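-- pv_equiv track=rewrite | github.com/6EMNKEY/CompactFUSE | break_point_clean_analisys.py | slice_Assembly_360bp
-- ===== SOURCE A (Python) =====
-- def slice_Assembly_360bp(base,lls):
--     c = 181
--     t = 0
--     selected = ""
--     flag = False
--     for i in lls[1:]:
--         if c + len(i) > base and not flag:
--             pos = base -c
--             selected += i[pos:]
--             flag=True
--         elif c + len(i) == base and not flag:
--             selected +=i
--             flag=True
--
--         elif flag:
--             selected+= i
--             t+=1
--             if t == 5:
--                 break
--         c+= len(i)
--     return selected
-- ===== SOURCE B (Python) =====
-- from itertools import accumulate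
-- from bisect import bisect_left
--
-- def slice_Assembly_360bp(base, lls):
--     lines = lls[1:]
--     # cum[j] = 181 + total length of lines[0..j]  (cumulative end after line j)
--     cum = list(accumulate((len(l) for l in lines), initial=181))[1:]
--     j = bisect_left(cum, base)
--     if j >= len(lines):
--         return ""
--     cstart = cum[j] - len(lines[j])
--     if cum[j] == base:
--         head = lines[j]
--     else:
--         head = lines[j][base - cstart:]
--     return head + "".join(lines[j + 1 : j + 6])
-- ===== Notes on version B (the rewrite author's own statement) =====
-- stated objective: alternative
-- what changed: Replaces A's single stateful scan (running offset c, flag, t-counter with break) by a prefix-sum list of cumulative line-end offsets with a bisect_left binary search for the boundary line, then a direct slice-and-join of the next five lines.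
import Mathlib
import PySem

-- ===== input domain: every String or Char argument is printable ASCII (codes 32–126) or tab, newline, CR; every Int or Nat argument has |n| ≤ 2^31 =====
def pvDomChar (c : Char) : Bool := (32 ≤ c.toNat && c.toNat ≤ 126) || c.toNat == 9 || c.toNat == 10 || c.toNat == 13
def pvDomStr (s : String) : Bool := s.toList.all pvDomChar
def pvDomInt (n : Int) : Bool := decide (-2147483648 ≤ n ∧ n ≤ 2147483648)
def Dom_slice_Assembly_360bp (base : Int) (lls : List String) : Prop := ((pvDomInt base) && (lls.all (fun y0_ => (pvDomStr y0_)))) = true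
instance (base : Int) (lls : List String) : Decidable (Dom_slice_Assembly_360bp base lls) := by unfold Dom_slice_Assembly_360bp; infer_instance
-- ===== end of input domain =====

-- B replaces A's linear stateful scan (flag/t/c accumulator loop) by a prefix-sum list
-- with a bisect_left binary search for the boundary line plus a slice-and-join of the
-- next five lines (objective: alternative decomposition; same observable result).

-- ===== PORT A =====
-- the for-loop of A, state (c, t, selected, flag); break at t == 5 returns immediately
def sliceALoop (base : Int) : List String → Int → Int → String → Bool → String
  | [], _, _, sel, _ => sel
  | i :: rest, c, t, sel, flag =>
    if c + PySem.Str.len i > base ∧ flag = false then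
      sliceALoop base rest (c + PySem.Str.len i) t (sel ++ PySem.Str.slice i (some (base - c)) none) true
    else if c + PySem.Str.len i = base ∧ flag = false then
      sliceALoop base rest (c + PySem.Str.len i) t (sel ++ i) true
    else if flag = true then
      if t + 1 = 5 then sel ++ i
      else sliceALoop base rest (c + PySem.Str.len i) (t + 1) (sel ++ i) true
    else
      sliceALoop base rest (c + PySem.Str.len i) t sel flag

def slice_Assembly_360bp (base : Int) (lls : List String) : String :=
  sliceALoop base (PySem.List.slice lls (some 1) none) 181 0 "" false

-- ===== PORT B =====
-- list(accumulate((len(l) for l in lines), initial=c))[1:] : cumulative end offsets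
def cumEnds (c : Int) : List String → List Int
  | [] => []
  | l :: rest => (c + PySem.Str.len l) :: cumEnds (c + PySem.Str.len l) rest

def slice_Assembly_360bp_alt (base : Int) (lls : List String) : String :=
  let lines := PySem.List.slice lls (some 1) none
  let cum := cumEnds 181 lines
  let j := PySem.List.bisectLeft cum base
  if lines.length ≤ j then ""
  else
    let line := lines.getD j ""
    let cend := cum.getD j 0
    let cstart := cend - PySem.Str.len line
    let head := if cend = base then line else PySem.Str.slice line (some (base - cstart)) none
    head ++ PySem.Str.join "" (PySem.List.slice lines (some ((j : Int) + 1)) (some ((j : Int) + 6)))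

-- ===== PRECONDITION & SPEC =====
def Spec_slice_Assembly_360bp (base : Int) (lls : List String) (out : String) : Prop := out = slice_Assembly_360bp_alt base lls
instance (base : Int) (lls : List String) (out : String) : Decidable (Spec_slice_Assembly_360bp base lls out) := by unfold Spec_slice_Assembly_360bp; infer_instance

-- ===== CLAIM (what is proved, stated in full; the proofs are below) =====
def Claim_equal_slice_Assembly_360bp : Prop := ∀ (base : Int) (lls : List String), Dom_slice_Assembly_360bp base lls → Spec_slice_Assembly_360bp base lls (slice_Assembly_360bp base lls)

-- ===== LEMMAS AND PROOFS =====

-- B's body with the starting offset generalised (181 ↦ c), for the induction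
def bBody (base c : Int) (lines : List String) : String :=
  if lines.length ≤ PySem.List.bisectLeft (cumEnds c lines) base then ""
  else
    (if (cumEnds c lines).getD (PySem.List.bisectLeft (cumEnds c lines) base) 0 = base then
        lines.getD (PySem.List.bisectLeft (cumEnds c lines) base) ""
      else
        PySem.Str.slice (lines.getD (PySem.List.bisectLeft (cumEnds c lines) base) "")
          (some (base - ((cumEnds c lines).getD (PySem.List.bisectLeft (cumEnds c lines) base) 0 -
            PySem.Str.len (lines.getD (PySem.List.bisectLeft (cumEnds c lines) base) "")))) none) ++
    PySem.Str.join "" (PySem.List.slice lines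
      (some ((PySem.List.bisectLeft (cumEnds c lines) base : Int) + 1))
      (some ((PySem.List.bisectLeft (cumEnds c lines) base : Int) + 6)))

theorem alt_eq_bBody (base : Int) (lls : List String) :
    slice_Assembly_360bp_alt base lls = bBody base 181 (PySem.List.slice lls (some 1) none) := rfl

theorem joinE_nil : PySem.Str.join "" [] = "" := rfl

theorem joinE_cons (x : String) (xs : List String) :
    PySem.Str.join "" (x :: xs) = x ++ PySem.Str.join "" xs := by
  apply String.toList_inj.mp
  cases xs with
  | nil => simp [PySem.Str.toList_join]
  | cons y ys => simp [PySem.Str.toList_join, PySem.Chars.join_cons_cons]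

theorem le_of_mem_cumEnds (c : Int) (lines : List String) (x : Int)
    (hx : x ∈ cumEnds c lines) : c ≤ x := by
  induction lines generalizing c with
  | nil => simp [cumEnds] at hx
  | cons l rest ih =>
    have hl : (0:Int) ≤ PySem.Str.len l := by simp [PySem.Str.len_eq]
    simp [cumEnds] at hx
    rcases hx with h | h
    · omega
    · have := ih (c + PySem.Str.len l) h; omega

theorem pairwise_cumEnds (c : Int) (lines : List String) :
    (cumEnds c lines).Pairwise (· ≤ ·) := by
  induction lines generalizing c with
  | nil => simp [cumEnds]
  | cons l rest ih =>
    simp [cumEnds]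
    exact ⟨fun x hx => le_of_mem_cumEnds _ _ _ hx, ih _⟩

-- bisect_left is the unique index j with: everything before j is < x, everything from j on is ≥ x
theorem bisectLeft_unique (xs : List Int) (x : Int) (hs : xs.Pairwise (· ≤ ·)) (j : Nat)
    (hle : j ≤ xs.length)
    (hlt : ∀ (k : Nat) (hk : k < xs.length), k < j → xs[k] < x)
    (hge : ∀ (k : Nat) (hk : k < xs.length), j ≤ k → x ≤ xs[k]) :
    PySem.List.bisectLeft xs x = j := by
  obtain ⟨h1, h2, h3⟩ := PySem.List.bisectLeft_spec xs x hs
  set b := PySem.List.bisectLeft xs x with hb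
  rcases Nat.lt_trichotomy b j with h | h | h
  · have hblen : b < xs.length := lt_of_lt_of_le h hle
    have := hlt b hblen h
    have := h3 b hblen (le_refl _)
    omega
  · exact h
  · have hjlen : j < xs.length := lt_of_lt_of_le h h1
    have := h2 j hjlen h
    have := hge j hjlen (le_refl _)
    omega

theorem bisectLeft_cons_lt (a : Int) (xs : List Int) (x : Int)
    (hs : (a :: xs).Pairwise (· ≤ ·)) (ha : a < x) :
    PySem.List.bisectLeft (a :: xs) x = PySem.List.bisectLeft xs x + 1 := by
  have hs' : xs.Pairwise (· ≤ ·) := (List.pairwise_cons.mp hs).2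
  obtain ⟨h1, h2, h3⟩ := PySem.List.bisectLeft_spec xs x hs'
  apply bisectLeft_unique _ _ hs
  · simpa using Nat.succ_le_succ h1
  · intro k hk hkj
    cases k with
    | zero => simpa using ha
    | succ k' =>
      have hk' : k' < xs.length := by simpa using hk
      have := h2 k' hk' (by omega)
      simpa using this
  · intro k hk hkj
    cases k with
    | zero => omega
    | succ k' =>
      have hk' : k' < xs.length := by simpa using hk
      have := h3 k' hk' (by omega)
      simpa using this

theorem bisectLeft_cons_ge (a : Int) (xs : List Int) (x : Int)
    (hs : (a :: xs).Pairwise (· ≤ ·)) (ha : x ≤ a) :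
    PySem.List.bisectLeft (a :: xs) x = 0 := by
  apply bisectLeft_unique _ _ hs
  · omega
  · omega
  · intro k hk _
    have hmem : (a :: xs)[k] = a ∨ (a :: xs)[k] ∈ xs := by
      cases k with
      | zero => left; rfl
      | succ k' =>
        right
        simpa using List.getElem_mem (show k' < xs.length by simpa using hk)
    rcases hmem with h | h
    · omega
    · have := (List.pairwise_cons.mp hs).1 _ h
      omega

-- phase 2 of A's loop: flag set, append the next (5 - t) lines
theorem sliceALoop_flag (base : Int) (rest : List String) (c t : Int) (sel : String)
    (ht0 : 0 ≤ t) (ht : t < 5) :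
    sliceALoop base rest c t sel true = sel ++ PySem.Str.join "" (rest.take (5 - t).toNat) := by
  induction rest generalizing c t sel with
  | nil => simp [sliceALoop, joinE_nil]
  | cons i rest ih =>
    unfold sliceALoop
    rw [if_neg (by simp), if_neg (by simp), if_pos rfl]
    by_cases h5 : t + 1 = 5
    · have ht4 : t = 4 := by omega
      subst ht4
      norm_num [joinE_cons, joinE_nil]
    · rw [if_neg h5, ih (c + PySem.Str.len i) (t + 1) (sel ++ i) (by omega) (by omega)]
      have hn : (5 - t).toNat = (5 - (t + 1)).toNat + 1 := by omega
      rw [hn, List.take_succ_cons, joinE_cons, String.append_assoc]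

theorem slice_succ_take (j : Nat) (lines : List String) :
    PySem.List.slice lines (some ((j : Int) + 1)) (some ((j : Int) + 6)) = (lines.drop (j + 1)).take 5 := by
  rw [show ((j : Int) + 1) = (((j + 1 : Nat)) : Int) by push_cast; ring,
      show ((j : Int) + 6) = (((j + 6 : Nat)) : Int) by push_cast; ring,
      PySem.List.slice_natCast]
  have h5 : j + 6 - (j + 1) = 5 := by omega
  rw [h5]

-- phase 1 + phase 2 vs B's body, offset generalised
theorem main_loop (base : Int) (lines : List String) (c : Int) :
    sliceALoop base lines c 0 "" false = bBody base c lines := by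
  induction lines generalizing c with
  | nil =>
    have hb : PySem.List.bisectLeft ([] : List Int) base = 0 :=
      Nat.le_zero.mp (PySem.List.bisectLeft_spec [] base (by simp)).1
    simp [sliceALoop, bBody, cumEnds, hb]
  | cons i rest ih =>
    have hL : (0 : Int) ≤ PySem.Str.len i := by simp [PySem.Str.len_eq]
    have hcum : cumEnds c (i :: rest) = (c + PySem.Str.len i) :: cumEnds (c + PySem.Str.len i) rest := rfl
    have hs := pairwise_cumEnds c (i :: rest)
    rw [hcum] at hs
    by_cases hge : base ≤ c + PySem.Str.len i
    · -- the boundary line is i (index 0)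
      have hj : PySem.List.bisectLeft (cumEnds c (i :: rest)) base = 0 := by
        rw [hcum]; exact bisectLeft_cons_ge _ _ _ hs hge
      unfold bBody
      rw [hj, if_neg (by simp), slice_succ_take]
      simp only [hcum, List.getD_cons_zero]
      have htail : ((i :: rest).drop (0 + 1)).take 5 = rest.take 5 := rfl
      rw [htail]
      have hco : base - (c + PySem.Str.len i - PySem.Str.len i) = base - c := by ring
      rw [hco]
      simp only [sliceALoop]
      by_cases hgt : c + PySem.Str.len i > base
      · rw [if_pos ⟨hgt, trivial⟩,
           sliceALoop_flag base rest _ 0 _ (by norm_num) (by norm_num),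
           if_neg (by omega), show ((5 : Int) - 0).toNat = 5 by decide]
        simp
      · have heq : c + PySem.Str.len i = base := by omega
        rw [if_neg (by rintro ⟨h1, -⟩; omega), if_pos ⟨heq, trivial⟩,
           sliceALoop_flag base rest _ 0 _ (by norm_num) (by norm_num),
           if_pos heq, show ((5 : Int) - 0).toNat = 5 by decide]
        simp
    · -- base beyond this line: A recurses with flag still false, B's bisect index shifts by one
      have hlt : c + PySem.Str.len i < base := by omega
      have hj : PySem.List.bisectLeft (cumEnds c (i :: rest)) base
          = PySem.List.bisectLeft (cumEnds (c + PySem.Str.len i) rest) base + 1 := by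
        rw [hcum]; exact bisectLeft_cons_lt _ _ _ hs hlt
      have hA : sliceALoop base (i :: rest) c 0 "" false
          = sliceALoop base rest (c + PySem.Str.len i) 0 "" false := by
        simp only [sliceALoop]
        rw [if_neg (by rintro ⟨h1, -⟩; omega), if_neg (by rintro ⟨h1, -⟩; omega),
            if_neg (by simp)]
      rw [hA, ih (c + PySem.Str.len i)]
      unfold bBody
      rw [hj]
      simp only [hcum, List.length_cons, Nat.add_le_add_iff_right, List.getD_cons_succ,
        slice_succ_take, List.drop_succ_cons]

-- ===== VERDICT (by name: the statement is the Claim_ definition above) =====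
theorem slice_Assembly_360bp_spec : Claim_equal_slice_Assembly_360bp := by
  intro base lls _
  unfold Spec_slice_Assembly_360bp
  rw [alt_eq_bBody]
  exact (main_loop base (PySem.List.slice lls (some 1) none) 181).symm ▸ rfl
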